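-- pv_equiv track=rewrite | github.com/malibrated/hermes-agent | agent/mlx_inference_engine.py | _split_system_messages
-- ===== SOURCE A (Python) =====
-- from typing import Any, Dict, List, Optional, Tuple
--
-- def _split_system_messages(
--     messages: List[Dict[str, Any]],
-- ) -> Tuple[List[Dict[str, Any]], List[Dict[str, Any]]]:
--     system: List[Dict[str, Any]] = []
--     rest: List[Dict[str, Any]] = []
--     in_system = True
--     for msg in messages:
--         if in_system and msg.get("role") == "system":
--             system.append(msg)
--         else:
--             in_system = False
--             rest.append(msg)
--     return system, rest
-- ===== SOURCE B (Python) =====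
-- def _split_system_messages(messages):
--     i = next(
--         (i for i, m in enumerate(messages) if m.get("role") != "system"),
--         len(messages),
--     )
--     return messages[:i], messages[i:]
-- ===== Notes on version B (the rewrite author's own statement) =====
-- stated objective: simpler
-- what changed: Replaces the in_system flag and the two per-element append loops with a single boundary-index search (first message whose role is not 'system') followed by two slices.
import Mathlib
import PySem

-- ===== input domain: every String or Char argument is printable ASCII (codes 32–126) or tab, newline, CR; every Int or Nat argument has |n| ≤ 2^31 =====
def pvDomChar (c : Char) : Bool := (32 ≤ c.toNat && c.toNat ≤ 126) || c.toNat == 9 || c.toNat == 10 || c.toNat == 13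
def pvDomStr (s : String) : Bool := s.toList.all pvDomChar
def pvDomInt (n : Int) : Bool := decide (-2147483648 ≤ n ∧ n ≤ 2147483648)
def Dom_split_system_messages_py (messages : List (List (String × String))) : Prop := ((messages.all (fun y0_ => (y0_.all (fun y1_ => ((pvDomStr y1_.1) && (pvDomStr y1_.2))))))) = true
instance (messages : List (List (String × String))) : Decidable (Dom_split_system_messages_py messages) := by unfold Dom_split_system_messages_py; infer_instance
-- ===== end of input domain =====

-- ===== PORT A =====
-- B rewrites A's flag-and-append loop as boundary-index search + two slices (simpler). No mutation involved.

-- msg.get("role"): first-match association-list lookup (Python dict has unique keys)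
def getRole : List (String × String) → Option String
  | [] => none
  | (k, v) :: t => if k == "role" then some v else getRole t

-- the for-loop body of A over the state (system, rest, in_system)
def stepA (st : List (List (String × String)) × List (List (String × String)) × Bool)
    (msg : List (String × String)) :
    List (List (String × String)) × List (List (String × String)) × Bool :=
  if st.2.2 && (getRole msg == some "system") then
    (st.1 ++ [msg], st.2.1, st.2.2)
  else
    (st.1, st.2.1 ++ [msg], false)

def split_system_messages_py (messages : List (List (String × String))) :
    (List (List (String × String))) × (List (List (String × String))) :=
  let st := messages.foldl stepA ([], [], true)
  (st.1, st.2.1)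

-- ===== PORT B =====
-- index of the first message whose role is not "system" (default: length)
def boundary : List (List (String × String)) → Nat
  | [] => 0
  | m :: t => if getRole m == some "system" then boundary t + 1 else 0

def split_system_messages_py_alt (messages : List (List (String × String))) :
    (List (List (String × String))) × (List (List (String × String))) :=
  let i : Int := (boundary messages : Nat)
  (PySem.List.slice messages none (some i), PySem.List.slice messages (some i) none)

-- ===== PRECONDITION & SPEC =====
def Spec_split_system_messages_py (messages : List (List (String × String))) (out : (List (List (String × String))) × (List (List (String × String)))) : Prop := out = split_system_messages_py_alt messages
instance (messages : List (List (String × String))) (out : (List (List (String × String))) × (List (List (String × String)))) : Decidable (Spec_split_system_messages_py messages out) := by unfold Spec_split_system_messages_py; infer_instance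

-- ===== CLAIM (what is proved, stated in full; the proofs are below) =====
def Claim_equal_split_system_messages_py : Prop := ∀ (messages : List (List (String × String))), Dom_split_system_messages_py messages → Spec_split_system_messages_py messages (split_system_messages_py messages)

-- ===== LEMMAS AND PROOFS =====

-- once the flag is false, every remaining message is appended to rest
theorem foldA_false (msgs : List (List (String × String)))
    (sys rest : List (List (String × String))) :
    msgs.foldl stepA (sys, rest, false) = (sys, rest ++ msgs, false) := by
  induction msgs generalizing rest with
  | nil => simp
  | cons m t ih => simp [stepA, ih]

-- while the flag is true, the fold splits at the boundary index
theorem foldA_true (msgs : List (List (String × String)))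
    (sys rest : List (List (String × String))) :
    msgs.foldl stepA (sys, rest, true) =
      (sys ++ msgs.take (boundary msgs), rest ++ msgs.drop (boundary msgs),
        msgs.all (fun m => getRole m == some "system")) := by
  induction msgs generalizing sys rest with
  | nil => simp
  | cons m t ih =>
    by_cases h : getRole m == some "system"
    · simp [stepA, h, boundary, ih]
    · simp [stepA, h, boundary, foldA_false]

-- ===== VERDICT (by name: the statement is the Claim_ definition above) =====
theorem split_system_messages_py_spec : Claim_equal_split_system_messages_py := by
  intro messages _
  unfold Spec_split_system_messages_py split_system_messages_py split_system_messages_py_alt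
  simp [foldA_true, PySem.List.slice_to_natCast, PySem.List.slice_from_natCast]
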